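-- pv_equiv track=rewrite | github.com/iZelikov/beegeek-algo | task_7_1.py | min_distance_between_peaks
-- ===== SOURCE A (Python) =====
-- def min_distance_between_peaks(nums):
--     peak = None
--     min_dist = len(nums)
--     for i in range(1, len(nums) - 1):
--         if nums[i - 1] < nums[i] > nums[i + 1]:
--             if peak:
--                 min_dist = min(min_dist, i - peak)
--             peak = i
--
--     return (-1, min_dist)[min_dist < len(nums)]
-- ===== SOURCE B (Python) =====
-- def min_distance_between_peaks(nums):
--     # sign of each consecutive difference: +1 rise, -1 fall, 0 flat
--     signs = [(y > x) - (y < x) for x, y in zip(nums, nums[1:])]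
--     # run-length encode the sign sequence into monotone runs
--     runs = []
--     for s in signs:
--         if runs and runs[-1][0] == s:
--             runs[-1] = (runs[-1][0], runs[-1][1] + 1)
--         else:
--             runs.append((s, 1))
--     # a peak sits exactly at the boundary of a rising run followed by a falling run
--     peaks = []
--     pos = 0
--     for (s, l), (t, _) in zip(runs, runs[1:]):
--         pos += l
--         if s == 1 and t == -1:
--             peaks.append(pos)
--     gaps = [q - p for p, q in zip(peaks, peaks[1:])]
--     return min(gaps) if gaps else -1
-- ===== Notes on version B (the rewrite author's own statement) =====
-- stated objective: alternative
-- what changed: B never tests individual indices for peak-hood: it maps the array to the sign sequence of consecutive differences, run-length encodes it into monotone runs, reads peaks off as boundaries where a +1 run meets a -1 run, and returns the minimum adjacent gap of those boundary positions (or -1), instead of A's single index scan with a last-peak/running-min accumulator seeded with len(nums).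
import Mathlib
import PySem

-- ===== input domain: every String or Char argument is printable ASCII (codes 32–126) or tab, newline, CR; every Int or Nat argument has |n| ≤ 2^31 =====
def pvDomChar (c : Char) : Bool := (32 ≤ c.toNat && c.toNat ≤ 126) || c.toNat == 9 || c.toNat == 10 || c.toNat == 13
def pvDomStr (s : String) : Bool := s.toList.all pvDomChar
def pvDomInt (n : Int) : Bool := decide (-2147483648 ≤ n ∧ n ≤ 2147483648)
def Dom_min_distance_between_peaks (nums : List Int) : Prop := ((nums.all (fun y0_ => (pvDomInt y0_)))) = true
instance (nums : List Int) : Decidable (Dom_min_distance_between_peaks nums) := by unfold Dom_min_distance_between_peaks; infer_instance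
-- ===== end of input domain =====

-- B finds peaks by run-length encoding the signs of consecutive differences
-- (a peak is a rising run followed by a falling run), then takes the min
-- adjacent gap; A is a single index scan with a last-peak/running-min accumulator.


-- ===== PORT A =====
-- 'nums[i-1] < nums[i] > nums[i+1]' (indices drawn from range(1, len(nums)-1) are
-- always in range, so the default of pyGetD is never used)
def pvPeak (nums : List Int) (i : Int) : Bool :=
  decide (PySem.List.pyGetD nums (i - 1) 0 < PySem.List.pyGetD nums i 0) &&
  decide (PySem.List.pyGetD nums i 0 > PySem.List.pyGetD nums (i + 1) 0)

-- A's loop body; 'if peak:' is Python truthiness on an Optional[int]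
def pvStep (nums : List Int) (st : Option Int × Int) (i : Int) : Option Int × Int :=
  if pvPeak nums i then
    (some i,
     match st.1 with
     | some p => if p ≠ 0 then min st.2 (i - p) else st.2
     | none => st.2)
  else st

-- literal port of A: one fold over range(1, len(nums)-1) carrying (peak, min_dist)
def min_distance_between_peaks (nums : List Int) : Int :=
  let n : Int := nums.length
  let st :=
    (PySem.List.pyRange 1 (n - 1) 1).foldl (pvStep nums) (none, n)
  -- '(-1, min_dist)[min_dist < len(nums)]'
  if st.2 < n then st.2 else -1

-- ===== PORT B =====
-- '(y > x) - (y < x)': the sign of the difference y - x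
def pvSgn (x y : Int) : Int := (if y > x then 1 else 0) - (if y < x then 1 else 0)

-- B's RLE loop body: 'if runs and runs[-1][0] == s: runs[-1] = (s, l+1) else: runs.append((s,1))'
def pvRleStep (rs : List (Int × Int)) (s : Int) : List (Int × Int) :=
  match rs.getLast? with
  | some (t, l) => if t == s then rs.dropLast ++ [(t, l + 1)] else rs ++ [(s, 1)]
  | none => [(s, 1)]

-- B's boundary-scan loop body over zip(runs, runs[1:]) carrying (pos, peaks)
def pvPeakStep (st : Int × List Int) (rr : (Int × Int) × (Int × Int)) : Int × List Int :=
  let pos := st.1 + rr.1.2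
  if rr.1.1 = 1 ∧ rr.2.1 = -1 then (pos, st.2 ++ [pos]) else (pos, st.2)

def min_distance_between_peaks_alt (nums : List Int) : Int :=
  let signs := (nums.zip (PySem.List.slice nums (some 1) none)).map (fun xy => pvSgn xy.1 xy.2)
  let runs := signs.foldl pvRleStep []
  let st := (runs.zip (PySem.List.slice runs (some 1) none)).foldl pvPeakStep (0, [])
  let peaks := st.2
  let gaps := (peaks.zip (PySem.List.slice peaks (some 1) none)).map (fun pq => pq.2 - pq.1)
  -- 'min(gaps) if gaps else -1'
  match gaps with
  | [] => -1
  | g :: gs => gs.foldl min g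

-- ===== PRECONDITION & SPEC =====
def Spec_min_distance_between_peaks (nums : List Int) (out : Int) : Prop := out = min_distance_between_peaks_alt nums
instance (nums : List Int) (out : Int) : Decidable (Spec_min_distance_between_peaks nums out) := by unfold Spec_min_distance_between_peaks; infer_instance

-- ===== CLAIM (what is proved, stated in full; the proofs are below) =====
def Claim_equal_min_distance_between_peaks : Prop := ∀ (nums : List Int), Dom_min_distance_between_peaks nums → Spec_min_distance_between_peaks nums (min_distance_between_peaks nums)

-- ===== LEMMAS AND PROOFS =====

-- the running-min A accumulates once a peak has been seen
def pvGomin (p : Int) (ps : List Int) (md : Int) : Int :=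
  match ps with
  | [] => md
  | q :: r => pvGomin q r (min md (q - p))

lemma pvFold_some (nums : List Int) :
    ∀ (l : List Int) (p md : Int), (∀ i ∈ l, (1:Int) ≤ i) → 1 ≤ p →
      l.foldl (pvStep nums) (some p, md) =
        ((l.filter (pvPeak nums)).foldl (fun _ i => some i) (some p),
         pvGomin p (l.filter (pvPeak nums)) md) := by
  intro l
  induction l with
  | nil => intro p md _ _; simp [pvGomin]
  | cons i l ih =>
    intro p md hl hp
    have hi : (1:Int) ≤ i := hl i (by simp)
    have hl' : ∀ j ∈ l, (1:Int) ≤ j := fun j hj => hl j (by simp [hj])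
    by_cases h : pvPeak nums i
    · simp only [List.foldl_cons, List.filter_cons, h, if_pos]
      have hp0 : p ≠ 0 := by omega
      simp only [pvStep, h, if_true]
      rw [if_pos hp0, ih i (min md (i - p)) hl' hi]
      simp [pvGomin]
    · simp only [List.foldl_cons, List.filter_cons, h]
      simp only [pvStep, h, Bool.false_eq_true, if_neg, not_false_iff]
      exact ih p md hl' hp

lemma pvFold_none (nums : List Int) :
    ∀ (l : List Int) (md : Int), (∀ i ∈ l, (1:Int) ≤ i) →
      l.foldl (pvStep nums) (none, md) =
        (match l.filter (pvPeak nums) with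
         | [] => ((none : Option Int), md)
         | p :: ps => (ps.foldl (fun _ i => some i) (some p), pvGomin p ps md)) := by
  intro l
  induction l with
  | nil => intro md _; simp
  | cons i l ih =>
    intro md hl
    have hi : (1:Int) ≤ i := hl i (by simp)
    have hl' : ∀ j ∈ l, (1:Int) ≤ j := fun j hj => hl j (by simp [hj])
    by_cases h : pvPeak nums i
    · simp only [List.foldl_cons, List.filter_cons, h, if_pos]
      simp only [pvStep, h, if_true]
      exact pvFold_some nums l i md hl' hi
    · simp only [List.foldl_cons, List.filter_cons, h]
      simp only [pvStep, h, Bool.false_eq_true, if_neg, not_false_iff]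
      exact ih md hl'

-- pvGomin is the left fold of min over the adjacent differences
lemma pvGomin_eq_foldl :
    ∀ (ps : List Int) (p md : Int),
      pvGomin p ps md =
        (((p :: ps).zip ps).map (fun ab => ab.2 - ab.1)).foldl min md := by
  intro ps
  induction ps with
  | nil => intro p md; simp [pvGomin]
  | cons q r ih => intro p md; simp only [pvGomin, List.zip_cons_cons, List.map_cons, List.foldl_cons]; exact ih q (min md (q - p))

lemma pvFoldl_min_le (l : List Int) : ∀ x : Int, l.foldl min x ≤ x := by
  induction l with
  | nil => simp
  | cons a l ih => intro x; exact le_trans (ih (min x a)) (min_le_left _ _)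

-- ---- B-side characterisation ----

-- signs of a list, structurally
def pvSignsOf : List Int → List Int
  | x :: y :: rest => pvSgn x y :: pvSignsOf (y :: rest)
  | _ => []

-- what the RLE fold builds once one run is open
def pvConsRLE (t l : Int) : List Int → List (Int × Int)
  | [] => [(t, l)]
  | s :: rest => if s = t then pvConsRLE t (l + 1) rest else (t, l) :: pvConsRLE s 1 rest

-- the boundary scan, structurally
def pvGo (pos : Int) : List (Int × Int) → List Int
  | (s, l) :: (t, m) :: rest => (if s = 1 ∧ t = -1 then [pos + l] else []) ++ pvGo (pos + l) ((t, m) :: rest)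
  | _ => []

-- the boundary scan expressed over the raw sign sequence
def pvPP (pos prev : Int) : List Int → List Int
  | [] => []
  | t :: rest => (if prev = 1 ∧ t = -1 then [pos] else []) ++ pvPP (pos + 1) t rest

-- the peak-index list, structurally over nums
def pvPeaksRec (i : Int) : List Int → List Int
  | a :: b :: c :: rest => (if a < b ∧ c < b then [i] else []) ++ pvPeaksRec (i + 1) (b :: c :: rest)
  | _ => []

lemma pvSigns_zip (nums : List Int) :
    (nums.zip nums.tail).map (fun xy => pvSgn xy.1 xy.2) = pvSignsOf nums := by
  induction nums with
  | nil => simp [pvSignsOf]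
  | cons x l ih =>
    cases l with
    | nil => simp [pvSignsOf]
    | cons y r => simp only [List.tail_cons, List.zip_cons_cons, List.map_cons, pvSignsOf]
                  rw [← ih]; simp

lemma pvRle_fold :
    ∀ (signs : List Int) (rs : List (Int × Int)) (t l : Int),
      signs.foldl pvRleStep (rs ++ [(t, l)]) = rs ++ pvConsRLE t l signs := by
  intro signs
  induction signs with
  | nil => intro rs t l; simp [pvConsRLE]
  | cons s rest ih =>
    intro rs t l
    simp only [List.foldl_cons]
    have hlast : (rs ++ [(t, l)]).getLast? = some (t, l) := by
      simp [List.getLast?_append]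
    by_cases h : t = s
    · subst h
      simp only [pvRleStep, hlast, beq_self_eq_true, if_true, List.dropLast_concat]
      rw [ih rs t (l + 1)]
      simp [pvConsRLE]
    · have hne : (t == s) = false := by simp [h]
      simp only [pvRleStep, hlast, hne, Bool.false_eq_true, if_neg, not_false_iff]
      rw [ih (rs ++ [(t, l)]) s 1]
      have hc : pvConsRLE t l (s :: rest) = (t, l) :: pvConsRLE s 1 rest := by
        simp only [pvConsRLE]
        rw [if_neg (fun hh => h hh.symm)]
      rw [hc]
      simp

lemma pvConsRLE_head : ∀ (rest : List Int) (t l : Int),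
    ∃ l' tl, pvConsRLE t l rest = (t, l') :: tl := by
  intro rest
  induction rest with
  | nil => intro t l; exact ⟨l, [], rfl⟩
  | cons s r ih =>
    intro t l
    by_cases h : s = t
    · subst h; simpa [pvConsRLE] using ih s (l + 1)
    · exact ⟨l, pvConsRLE s 1 r, by simp [pvConsRLE, h]⟩

lemma pvGo_consRLE : ∀ (rest : List Int) (pos prev l : Int),
    pvGo pos (pvConsRLE prev l rest) = pvPP (pos + l) prev rest := by
  intro rest
  induction rest with
  | nil => intro pos prev l; simp [pvConsRLE, pvGo, pvPP]
  | cons t r ih =>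
    intro pos prev l
    by_cases h : t = prev
    · subst h
      have hc : pvConsRLE t l (t :: r) = pvConsRLE t (l + 1) r := by
        simp [pvConsRLE]
      rw [hc, ih pos t (l + 1)]
      simp only [pvPP]
      have hcond : ¬ (t = 1 ∧ t = -1) := by omega
      rw [if_neg hcond]
      have he : pos + (l + 1) = pos + l + 1 := by ring
      simp [he]
    · have hc : pvConsRLE prev l (t :: r) = (prev, l) :: pvConsRLE t 1 r := by
        simp [pvConsRLE, h]
      rw [hc]
      obtain ⟨l', tl, he⟩ := pvConsRLE_head r t 1
      rw [he]
      simp only [pvGo]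
      rw [← he, ih (pos + l) t 1]
      rfl

lemma pvPeakFold : ∀ (runs : List (Int × Int)) (pos : Int) (acc : List Int),
    ((runs.zip runs.tail).foldl pvPeakStep (pos, acc)).2 = acc ++ pvGo pos runs := by
  intro runs
  induction runs with
  | nil => intro pos acc; simp [pvGo]
  | cons r rs ih =>
    intro pos acc
    cases rs with
    | nil => cases r with | mk s l => simp [pvGo]
    | cons r2 rs2 =>
      cases r with | mk s l =>
      cases r2 with | mk t m =>
      simp only [List.tail_cons, List.zip_cons_cons, List.foldl_cons]
      have ih' := ih
      simp only [List.tail_cons] at ih'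
      have step : pvPeakStep (pos, acc) ((s, l), (t, m))
          = (pos + l, if s = 1 ∧ t = -1 then acc ++ [pos + l] else acc) := by
        simp only [pvPeakStep]
        split_ifs <;> rfl
      rw [step]
      by_cases h : s = 1 ∧ t = -1
      · rw [if_pos h, ih' (pos + l) (acc ++ [pos + l])]
        simp [pvGo, h]
      · rw [if_neg h, ih' (pos + l) acc]
        simp [pvGo, h]

lemma pvSgn_one (x y : Int) : pvSgn x y = 1 ↔ x < y := by
  unfold pvSgn; split_ifs <;> omega

lemma pvSgn_negone (x y : Int) : pvSgn x y = -1 ↔ y < x := by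
  unfold pvSgn; split_ifs <;> omega

lemma pvPP_signs : ∀ (rest : List Int) (a b pos : Int),
    pvPP pos (pvSgn a b) (pvSignsOf (b :: rest)) = pvPeaksRec pos (a :: b :: rest) := by
  intro rest
  induction rest with
  | nil => intro a b pos; simp [pvSignsOf, pvPP, pvPeaksRec]
  | cons c r ih =>
    intro a b pos
    simp only [pvSignsOf, pvPP, pvPeaksRec]
    rw [ih b c (pos + 1)]
    congr 1
    by_cases h : a < b ∧ c < b
    · rw [if_pos, if_pos h]
      exact ⟨(pvSgn_one a b).2 h.1, (pvSgn_negone b c).2 h.2⟩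
    · rw [if_neg, if_neg h]
      intro hh
      exact h ⟨(pvSgn_one a b).1 hh.1, (pvSgn_negone b c).1 hh.2⟩

lemma pvGetD_of_drop (nums : List Int) (j : ℕ) (a : Int) (tl : List Int)
    (h : nums.drop j = a :: tl) : PySem.List.pyGetD nums (j : Int) 0 = a := by
  have hj : j < nums.length := by
    by_contra hc
    rw [List.drop_eq_nil_of_le (by omega)] at h
    exact absurd h (by simp)
  have hg : nums[j]? = some a := by
    have h0 : (nums.drop j)[0]? = some a := by rw [h]; rfl
    rw [List.getElem?_drop] at h0
    simpa using h0
  rw [PySem.List.pyGetD_natCast]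
  simp [List.getD, hg]

lemma pvFilter_peaksRec : ∀ (s : List Int) (nums : List Int) (j : ℕ), nums.drop j = s →
    (PySem.List.pyRange ((j : Int) + 1) ((nums.length : Int) - 1) 1).filter (pvPeak nums)
      = pvPeaksRec ((j : Int) + 1) s := by
  intro s
  induction s with
  | nil =>
    intro nums j h
    have : nums.length ≤ j := by
      have hlen := congrArg List.length h
      simp [List.length_drop] at hlen
      omega
    rw [PySem.List.pyRange_one_eq_nil (by omega)]
    simp [pvPeaksRec]
  | cons a tl ih =>
    intro nums j h
    have hj : j < nums.length := by
      by_contra hc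
      rw [List.drop_eq_nil_of_le (by omega)] at h
      exact absurd h (by simp)
    have hdrop1 : nums.drop (j + 1) = tl := by
      rw [← List.drop_drop, h]; rfl
    cases tl with
    | nil =>
      have hlen : nums.length = j + 1 := by
        have h2 := congrArg List.length h
        simp at h2; omega
      rw [PySem.List.pyRange_one_eq_nil (by rw [hlen]; omega)]
      simp [pvPeaksRec]
    | cons b tl2 =>
      cases tl2 with
      | nil =>
        have hlen : nums.length = j + 2 := by
          have h2 := congrArg List.length h
          simp at h2; omega
        rw [PySem.List.pyRange_one_eq_nil (by rw [hlen]; omega)]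
        simp [pvPeaksRec]
      | cons c rest =>
        have hlen : nums.length = j + 3 + rest.length := by
          have h2 := congrArg List.length h
          simp at h2; omega
        have hlt : ((j : Int) + 1) < (nums.length : Int) - 1 := by rw [hlen]; push_cast; omega
        rw [PySem.List.pyRange_one_cons hlt, List.filter_cons]
        have hdrop2 : nums.drop (j + 2) = c :: rest := by
          have he : j + 2 = (j + 1) + 1 := by omega
          rw [he, ← List.drop_drop, hdrop1]; rfl
        have ga : PySem.List.pyGetD nums ((j : Int)) 0 = a := pvGetD_of_drop nums j a _ h
        have gb : PySem.List.pyGetD nums ((j : Int) + 1) 0 = b := by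
          have := pvGetD_of_drop nums (j + 1) b _ hdrop1
          rwa [Nat.cast_add, Nat.cast_one] at this
        have gc : PySem.List.pyGetD nums ((j : Int) + 2) 0 = c := by
          have := pvGetD_of_drop nums (j + 2) c _ hdrop2
          rwa [Nat.cast_add, Nat.cast_ofNat] at this
        have hpk : pvPeak nums ((j : Int) + 1) = decide (a < b ∧ c < b) := by
          unfold pvPeak
          have e1 : (j : Int) + 1 - 1 = (j : Int) := by ring
          have e2 : (j : Int) + 1 + 1 = (j : Int) + 2 := by ring
          rw [e1, e2, ga, gb, gc]
          by_cases hab : a < b <;> by_cases hcb : c < b <;>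
            simp [hab, hcb, gt_iff_lt]
        have ihr := ih nums (j + 1) hdrop1
        rw [Nat.cast_add, Nat.cast_one] at ihr
        have e3 : (j : Int) + 1 + 1 = (j : Int) + 2 := by ring
        rw [e3] at ihr
        have e4 : (j : Int) + 2 = ((j : Int) + 1) + 1 := by ring
        simp only [pvPeaksRec]
        by_cases hcond : a < b ∧ c < b
        · rw [if_pos hcond]
          have : pvPeak nums ((j : Int) + 1) = true := by rw [hpk]; simp [hcond]
          rw [this]
          simp only [if_true]
          rw [← e4, ihr]
          simp
        · rw [if_neg hcond]
          have : pvPeak nums ((j : Int) + 1) = false := by rw [hpk]; simp [hcond]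
          simp only [this, Bool.false_eq_true, if_neg, not_false_iff]
          rw [← e4, ihr]
          simp

-- B evaluated: it computes the min adjacent gap of pvPeaksRec 1 nums (or -1)
lemma pvB_eq (nums : List Int) :
    min_distance_between_peaks_alt nums =
      (match ((pvPeaksRec 1 nums).zip (pvPeaksRec 1 nums).tail).map (fun pq => pq.2 - pq.1) with
       | [] => -1
       | g :: gs => gs.foldl min g) := by
  unfold min_distance_between_peaks_alt
  simp only [PySem.List.slice_from_one]
  rw [pvSigns_zip]
  cases nums with
  | nil => simp [pvSignsOf, pvPeaksRec]
  | cons x l =>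
    cases l with
    | nil => simp [pvSignsOf, pvPeaksRec]
    | cons y r =>
      have hsigns : pvSignsOf (x :: y :: r) = pvSgn x y :: pvSignsOf (y :: r) := rfl
      rw [hsigns]
      have hrle : (pvSgn x y :: pvSignsOf (y :: r)).foldl pvRleStep []
          = pvConsRLE (pvSgn x y) 1 (pvSignsOf (y :: r)) := by
        have h0 : pvRleStep [] (pvSgn x y) = [] ++ [(pvSgn x y, 1)] := by
          simp [pvRleStep]
        rw [List.foldl_cons, h0, pvRle_fold]
        simp
      rw [hrle]
      rw [pvPeakFold (pvConsRLE (pvSgn x y) 1 (pvSignsOf (y :: r))) 0 []]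
      rw [pvGo_consRLE (pvSignsOf (y :: r)) 0 (pvSgn x y) 1]
      have : (0 : Int) + 1 = 1 := by ring
      rw [this, pvPP_signs r x y 1]
      simp

theorem pv_main (nums : List Int) :
    min_distance_between_peaks nums = min_distance_between_peaks_alt nums := by
  rw [pvB_eq]
  show (if ((PySem.List.pyRange 1 ((nums.length : Int) - 1) 1).foldl (pvStep nums)
              (none, (nums.length : Int))).2 < (nums.length : Int)
        then ((PySem.List.pyRange 1 ((nums.length : Int) - 1) 1).foldl (pvStep nums)
              (none, (nums.length : Int))).2 else -1) = _
  set n : Int := (nums.length : Int) with hn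
  set l := PySem.List.pyRange 1 (n - 1) 1 with hldef
  have hbound : ∀ i ∈ l, (1:Int) ≤ i ∧ i < n - 1 := by
    intro i hi
    rw [hldef, PySem.List.mem_pyRange_one] at hi
    exact hi
  have hl1 : ∀ i ∈ l, (1:Int) ≤ i := fun i hi => (hbound i hi).1
  have hfl : ∀ i ∈ l.filter (pvPeak nums), (1:Int) ≤ i ∧ i < n - 1 :=
    fun i hi => hbound i (List.mem_of_mem_filter hi)
  have hP : l.filter (pvPeak nums) = pvPeaksRec 1 nums := by
    have := pvFilter_peaksRec nums nums 0 (by simp)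
    simpa using this
  rw [pvFold_none nums l n hl1]
  rw [← hP]
  cases hps : l.filter (pvPeak nums) with
  | nil => simp
  | cons p ps =>
    cases hps' : ps with
    | nil => simp [pvGomin]
    | cons q r =>
      subst hps'
      simp only [List.tail_cons, List.zip_cons_cons, List.map_cons]
      rw [pvGomin_eq_foldl]
      simp only [List.zip_cons_cons, List.map_cons, List.foldl_cons]
      have hq : q ∈ l.filter (pvPeak nums) := by rw [hps]; simp
      have hp : p ∈ l.filter (pvPeak nums) := by rw [hps]; simp
      have hqn : q - p < n := by
        have := (hfl q hq).2; have := (hfl p hp).1; omega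
      have habs : min n (q - p) = q - p := min_eq_right (le_of_lt hqn)
      rw [habs]
      have hle := pvFoldl_min_le ((((q :: r).zip r).map (fun ab => ab.2 - ab.1))) (q - p)
      have hlt : (((q :: r).zip r).map (fun ab => ab.2 - ab.1)).foldl min (q - p) < n :=
        lt_of_le_of_lt hle hqn
      simp only [if_pos hlt]

-- ===== VERDICT (by name: the statement is the Claim_ definition above) =====
theorem min_distance_between_peaks_spec : Claim_equal_min_distance_between_peaks := by
  intro nums _
  unfold Spec_min_distance_between_peaks
  exact pv_main nums
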